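-- pv_equiv track=rewrite | github.com/Agnimandur/USACO | USACO Bronze/2018 Open Test/Family Tree/family.py | commonAncestor
-- ===== SOURCE A (Python) =====
-- def commonAncestor(Bessie,Elsie,familyTree):
--     BessieAncestors = []
--     i = Bessie
--     while i in familyTree.keys():
--         BessieAncestors.append(familyTree[i])
--         i = familyTree[i]
--
--     ElsieAncestors = []
--     i = Elsie
--     while i in familyTree.keys():
--         ElsieAncestors.append(familyTree[i])
--         i = familyTree[i]
--
--     ancestor = 0
--     ageDiff = 0
--     if Elsie not in BessieAncestors:
--         for i in range(0,
--                        len(BessieAncestors)):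
--             if BessieAncestors[i] in ElsieAncestors:
--                 ancestor = i + 1
--                 ageDiff = i - ElsieAncestors.index(BessieAncestors[i])
--                 break
--     else:
--         ancestor = BessieAncestors.index(Elsie) + 1
--         ageDiff = ancestor
--     return ancestor,ageDiff
-- ===== SOURCE B (Python) =====
-- def commonAncestor(Bessie, Elsie, familyTree):
--     # index table: every node on Elsie's chain (herself included) -> its depth
--     depth = {Elsie: 0}
--     node = Elsie
--     d = 0
--     while node in familyTree:
--         node = familyTree[node]
--         d += 1
--         depth[node] = d
--     # one pass up Bessie's chain; first node known to the table decides both answers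
--     node = Bessie
--     p = 0
--     while node in familyTree:
--         node = familyTree[node]
--         p += 1
--         if node in depth:
--             return p, p - depth[node]
--     return 0, 0
-- ===== Notes on version B (the rewrite author's own statement) =====
-- stated objective: alternative
-- what changed: Replaced A's two materialized ancestor lists with an if/else over membership tests and nested .index rescans by a depth dictionary built once over Elsie's chain (herself at depth 0) plus a single early-exit walk up Bessie's chain that yields both answers from one table lookup.
import Mathlib
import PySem

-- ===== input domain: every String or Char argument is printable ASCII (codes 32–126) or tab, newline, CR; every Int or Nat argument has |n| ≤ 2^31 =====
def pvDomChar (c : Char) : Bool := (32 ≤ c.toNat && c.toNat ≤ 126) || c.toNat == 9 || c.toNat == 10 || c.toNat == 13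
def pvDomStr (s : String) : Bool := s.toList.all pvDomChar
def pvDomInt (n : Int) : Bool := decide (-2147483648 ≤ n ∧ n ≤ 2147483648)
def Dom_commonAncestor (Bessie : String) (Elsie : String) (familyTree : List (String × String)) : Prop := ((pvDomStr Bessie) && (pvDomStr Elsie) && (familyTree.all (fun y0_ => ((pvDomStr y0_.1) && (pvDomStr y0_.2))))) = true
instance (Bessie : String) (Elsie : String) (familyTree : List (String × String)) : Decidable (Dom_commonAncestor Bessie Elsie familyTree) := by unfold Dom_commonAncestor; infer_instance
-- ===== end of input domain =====

-- B replaces A's two ancestor lists with index rescans by one depth table over Elsie's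
-- chain plus a single early-exit pass up Bessie's chain (alternative decomposition).

-- ===== PORT A =====
-- 'while i in familyTree.keys(): append familyTree[i]; i = familyTree[i]' — the walk
-- terminates iff no key on the chain repeats; fuel |familyTree|+1 is enough for every
-- terminating walk (Pre_ excludes the diverging ones), so the port walks with that fuel.
def ancChainA (t : List (String × String)) : Nat → String → List String
  | 0, _ => []
  | f + 1, i =>
    match (PySem.Dict.mk t).get? i with
    | none => []
    | some p => p :: ancChainA t f p

-- the 'for i in range(0, len(BessieAncestors)): if BessieAncestors[i] in ElsieAncestors: …; break'
def scanA (ea : List String) : List String → Nat → Int × Int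
  | [], _ => (0, 0)
  | a :: rest, i =>
    match PySem.List.index? ea a with
    | some j => ((i : Int) + 1, (i : Int) - (j : Int))
    | none => scanA ea rest (i + 1)

def commonAncestor (Bessie : String) (Elsie : String) (familyTree : List (String × String)) : Int × Int :=
  let bessieAncestors := ancChainA familyTree (familyTree.length + 1) Bessie
  let elsieAncestors := ancChainA familyTree (familyTree.length + 1) Elsie
  if ¬ (Elsie ∈ bessieAncestors) then
    scanA elsieAncestors bessieAncestors 0
  else
    let ancestor : Int := ((PySem.List.index? bessieAncestors Elsie).getD 0 : Nat) + 1
    (ancestor, ancestor)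

-- ===== PORT B =====
-- 'while node in familyTree: node = familyTree[node]; d += 1; depth[node] = d'
def depthChainB (t : List (String × String)) : Nat → String → Int → PySem.Dict String Int → PySem.Dict String Int
  | 0, _, _, dep => dep
  | f + 1, node, d, dep =>
    match (PySem.Dict.mk t).get? node with
    | none => dep
    | some p => depthChainB t f p (d + 1) (dep.insert p (d + 1))

-- 'while node in familyTree: node = familyTree[node]; p += 1; if node in depth: return …'
def walkB (t : List (String × String)) (dep : PySem.Dict String Int) : Nat → String → Int → Int × Int
  | 0, _, _ => (0, 0)
  | f + 1, node, p =>
    match (PySem.Dict.mk t).get? node with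
    | none => (0, 0)
    | some q =>
      if dep.contains q then (p + 1, p + 1 - dep.getD q 0)
      else walkB t dep f q (p + 1)

def commonAncestor_alt (Bessie : String) (Elsie : String) (familyTree : List (String × String)) : Int × Int :=
  let dep := depthChainB familyTree (familyTree.length + 1) Elsie 0 (PySem.Dict.empty.insert Elsie 0)
  walkB familyTree dep (familyTree.length + 1) Bessie 0

-- ===== PRECONDITION & SPEC =====
-- A diverges (infinite while loop) exactly when the parent chain from Bessie or from Elsie
-- runs into a cycle; a terminating chain makes at most |familyTree| successful lookups, so
-- termination is decided by walking with fuel |familyTree|+1. Pre_ excludes only inputs on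
-- which Python A never returns.
def chainHalts (t : List (String × String)) : Nat → String → Bool
  | 0, i => ((PySem.Dict.mk t).get? i).isNone
  | f + 1, i =>
    match (PySem.Dict.mk t).get? i with
    | none => true
    | some p => chainHalts t f p

def Pre_commonAncestor (Bessie : String) (Elsie : String) (familyTree : List (String × String)) : Prop :=
  chainHalts familyTree (familyTree.length + 1) Bessie = true ∧
  chainHalts familyTree (familyTree.length + 1) Elsie = true

instance (Bessie : String) (Elsie : String) (familyTree : List (String × String)) : Decidable (Pre_commonAncestor Bessie Elsie familyTree) := by unfold Pre_commonAncestor; infer_instance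

def pvWitness_commonAncestor : String × String × (List (String × String)) :=
  ("b", "e", [("b", "x"), ("e", "x")])

def Spec_commonAncestor (Bessie : String) (Elsie : String) (familyTree : List (String × String)) (out : Int × Int) : Prop := out = commonAncestor_alt Bessie Elsie familyTree
instance (Bessie : String) (Elsie : String) (familyTree : List (String × String)) (out : Int × Int) : Decidable (Spec_commonAncestor Bessie Elsie familyTree out) := by unfold Spec_commonAncestor; infer_instance

-- ===== CLAIM (what is proved, stated in full; the proofs are below) =====
def Claim_equal_commonAncestor : Prop := ∀ (Bessie : String) (Elsie : String) (familyTree : List (String × String)), Dom_commonAncestor Bessie Elsie familyTree → Pre_commonAncestor Bessie Elsie familyTree → Spec_commonAncestor Bessie Elsie familyTree (commonAncestor Bessie Elsie familyTree)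

-- ===== LEMMAS AND PROOFS =====

-- the parent chain as a relation: l is THE maximal parent chain starting above i
inductive PvChain (t : List (String × String)) : String → List String → Prop
  | nil {i} : (PySem.Dict.mk t).get? i = none → PvChain t i []
  | cons {i p l} : (PySem.Dict.mk t).get? i = some p → PvChain t p l → PvChain t i (p :: l)

theorem pvChain_of_halts (t : List (String × String)) :
    ∀ (f : Nat) (i : String), chainHalts t f i = true → PvChain t i (ancChainA t f i) := by
  intro f
  induction f with
  | zero =>
    intro i h
    simp only [chainHalts, Option.isNone_iff_eq_none] at h
    simpa [ancChainA] using PvChain.nil h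
  | succ f ih =>
    intro i h
    simp only [chainHalts] at h
    simp only [ancChainA]
    cases hg : (PySem.Dict.mk t).get? i with
    | none => exact PvChain.nil hg
    | some p =>
      rw [hg] at h
      exact PvChain.cons hg (ih p h)

theorem pvChain_unique {t : List (String × String)} {i : String} {l l' : List String}
    (h : PvChain t i l) (h' : PvChain t i l') : l = l' := by
  induction h generalizing l' with
  | nil hg => cases h' with
    | nil => rfl
    | cons hg' _ => simp [hg] at hg'
  | cons hg _ ih => cases h' with
    | nil hg' => simp [hg'] at hg
    | cons hg' htl' =>
      rw [hg] at hg'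
      cases hg'
      exact congrArg _ (ih htl')

theorem pvChain_mem {t : List (String × String)} {i x : String} {l : List String}
    (h : PvChain t i l) (hx : x ∈ l) : ∃ l2, PvChain t x l2 ∧ l2.length < l.length := by
  induction h with
  | nil => cases hx
  | cons hg htl ih =>
    rcases List.mem_cons.mp hx with rfl | hx'
    · exact ⟨_, htl, by simp⟩
    · obtain ⟨l2, hc, hlen⟩ := ih hx'
      exact ⟨l2, hc, by simpa using Nat.lt_succ_of_lt hlen⟩

theorem pvChain_nodup {t : List (String × String)} {i : String} {l : List String}
    (h : PvChain t i l) : (i :: l).Nodup := by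
  induction h with
  | nil => simp
  | @cons i p l hg htl ih =>
    refine List.nodup_cons.mpr ⟨?_, ih⟩
    intro hi
    obtain ⟨l2, hc, hlen⟩ := pvChain_mem (PvChain.cons hg htl) hi
    have hl := congrArg List.length (pvChain_unique (PvChain.cons hg htl) hc)
    simp only [List.length_cons] at hl hlen
    omega

theorem pvChain_suffix {t : List (String × String)} {x : String} {l1 l2 : List String} :
    ∀ {i : String}, PvChain t i (l1 ++ x :: l2) → PvChain t x l2 := by
  induction l1 with
  | nil =>
    intro i h
    cases h with
    | cons _ htl => exact htl
  | cons a l1' ih =>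
    intro i h
    cases h with
    | cons _ htl => exact ih htl

-- B's depth walk follows exactly the chain list, folding inserts
def foldIns : List String → Int → PySem.Dict String Int → PySem.Dict String Int
  | [], _, dep => dep
  | a :: rest, d, dep => foldIns rest (d + 1) (dep.insert a (d + 1))

theorem depthChainB_eq_foldIns (t : List (String × String)) :
    ∀ (f : Nat) (i : String) (d : Int) (dep : PySem.Dict String Int),
      depthChainB t f i d dep = foldIns (ancChainA t f i) d dep := by
  intro f
  induction f with
  | zero => intro i d dep; simp [depthChainB, ancChainA, foldIns]
  | succ f ih =>
    intro i d dep
    simp only [depthChainB, ancChainA]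
    cases hg : (PySem.Dict.mk t).get? i with
    | none => simp [foldIns]
    | some p => simp [foldIns, ih]

theorem get?_foldIns_of_not_mem {x : String} :
    ∀ (c : List String) (d : Int) (dep : PySem.Dict String Int), x ∉ c →
      (foldIns c d dep).get? x = dep.get? x := by
  intro c
  induction c with
  | nil => intro d dep _; rfl
  | cons a rest ih =>
    intro d dep hx
    simp only [List.mem_cons, not_or] at hx
    rw [foldIns, ih _ _ hx.2, PySem.Dict.get?_insert_of_ne _ _ hx.1]

theorem get?_foldIns {x : String} :
    ∀ (c : List String) (d : Int) (dep : PySem.Dict String Int), c.Nodup →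
      (foldIns c d dep).get? x =
        match PySem.List.index? c x with
        | some j => some (d + 1 + (j : Int))
        | none => dep.get? x := by
  intro c
  induction c with
  | nil => intro d dep _; simp [foldIns, PySem.List.index?_eq_idxOf?, List.idxOf?]
  | cons a rest ih =>
    intro d dep hnd
    rw [List.nodup_cons] at hnd
    by_cases hax : x = a
    · subst hax
      rw [foldIns, get?_foldIns_of_not_mem rest _ _ hnd.1,
        PySem.Dict.get?_insert_self, PySem.List.index?_cons_self]
      simp
    · rw [foldIns, ih _ _ hnd.2, PySem.List.index?_cons_of_ne _ (fun h => hax h.symm)]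
      cases hj : PySem.List.index? rest x with
      | none => simp [PySem.Dict.get?_insert_of_ne _ _ hax]
      | some j =>
        simp only [Option.map_some]
        push_cast
        ring_nf

-- B's bessie walk follows exactly the chain list
def scanD (dep : PySem.Dict String Int) : List String → Int → Int × Int
  | [], _ => (0, 0)
  | a :: rest, p =>
    if dep.contains a then (p + 1, p + 1 - dep.getD a 0)
    else scanD dep rest (p + 1)

theorem walkB_eq_scanD (t : List (String × String)) (dep : PySem.Dict String Int) :
    ∀ (f : Nat) (i : String) (p : Int),
      walkB t dep f i p = scanD dep (ancChainA t f i) p := by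
  intro f
  induction f with
  | zero => intro i p; simp [walkB, ancChainA, scanD]
  | succ f ih =>
    intro i p
    simp only [walkB, ancChainA]
    cases hg : (PySem.Dict.mk t).get? i with
    | none => simp [scanD]
    | some q => simp [scanD, ih]

-- the depth table built from Elsie's chain, looked up
theorem dep_get? (Elsie : String) (ea : List String) (hnd : (Elsie :: ea).Nodup) (x : String) :
    (foldIns ea 0 (PySem.Dict.empty.insert Elsie 0)).get? x =
      Option.map (fun j : Nat => (j : Int)) (PySem.List.index? (Elsie :: ea) x) := by
  rw [List.nodup_cons] at hnd
  rw [get?_foldIns ea 0 _ hnd.2]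
  by_cases hx : x = Elsie
  · subst hx
    rw [(PySem.List.index?_eq_none_iff _ _).mpr hnd.1, PySem.List.index?_cons_self]
    simp [PySem.Dict.get?_insert_self]
  · rw [PySem.List.index?_cons_of_ne _ (fun h => hx h.symm)]
    cases hj : PySem.List.index? ea x with
    | none => simp [PySem.Dict.get?_insert_of_ne _ _ hx, PySem.Dict.get?_empty]
    | some j =>
      simp only [Option.map_some]
      push_cast
      ring_nf

-- case Elsie ∉ bessie chain: the two scans agree step by step
theorem scanA_eq_scanD (Elsie : String) (ea : List String) (dep : PySem.Dict String Int)
    (hdep : ∀ x, dep.get? x = Option.map (fun j : Nat => (j : Int)) (PySem.List.index? (Elsie :: ea) x)) :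
    ∀ (ba : List String) (i : Nat), Elsie ∉ ba →
      scanA ea ba i = scanD dep ba (i : Int) := by
  intro ba
  induction ba with
  | nil => intro i _; rfl
  | cons a rest ih =>
    intro i hE
    simp only [List.mem_cons, not_or] at hE
    have hge : dep.get? a = Option.map (fun j : Nat => (j : Int)) (Option.map (fun x => x + 1) (PySem.List.index? ea a)) := by
      rw [hdep a, PySem.List.index?_cons_of_ne _ hE.1]
    rw [scanA, scanD]
    cases hj : PySem.List.index? ea a with
    | some j =>
      have hg2 : dep.get? a = some ((j : Int) + 1) := by
        rw [hge, hj]; simp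
      have hc : dep.contains a = true := by
        rw [PySem.Dict.contains_eq_isSome_get?, hg2]; rfl
      have hgd : dep.getD a 0 = (j : Int) + 1 := by
        rw [PySem.Dict.getD_eq_get?_getD, hg2]; rfl
      rw [if_pos hc, hgd]
      simp only [Prod.mk.injEq]
      refine ⟨by push_cast, by ring⟩
    | none =>
      have hg2 : dep.get? a = none := by rw [hge, hj]; rfl
      have hc : dep.contains a = false := by
        rw [PySem.Dict.contains_eq_isSome_get?, hg2]; rfl
      rw [if_neg (by simp [hc]), ih _ hE.2]
      norm_cast

-- case Elsie ∈ bessie chain: scanD skips the prefix then fires on Elsie itself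
theorem scanD_skip (dep : PySem.Dict String Int) :
    ∀ (l1 rest : List String) (p : Int), (∀ a ∈ l1, dep.contains a = false) →
      scanD dep (l1 ++ rest) p = scanD dep rest (p + l1.length) := by
  intro l1
  induction l1 with
  | nil => intro rest p _; simp
  | cons a l1' ih =>
    intro rest p h
    rw [List.cons_append, scanD, if_neg (by simp [h a (by simp)]), ih _ _ (fun b hb => h b (by simp [hb]))]
    congr 1
    simp only [List.length_cons]
    push_cast
    ring

-- ===== VERDICT (by name: the statement is the Claim_ definition above) =====
theorem commonAncestor_spec : Claim_equal_commonAncestor := by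
  intro Bessie Elsie t _ hPre
  unfold Spec_commonAncestor
  obtain ⟨hB, hE⟩ := hPre
  have hcB := pvChain_of_halts t _ _ hB
  have hcE := pvChain_of_halts t _ _ hE
  set ba := ancChainA t (t.length + 1) Bessie with hba
  set ea := ancChainA t (t.length + 1) Elsie with hea
  have hndB := pvChain_nodup hcB
  have hndE := pvChain_nodup hcE
  have hdepd : depthChainB t (t.length + 1) Elsie 0 (PySem.Dict.empty.insert Elsie 0) =
      foldIns ea 0 (PySem.Dict.empty.insert Elsie 0) := depthChainB_eq_foldIns t _ _ _ _
  set dep := foldIns ea 0 (PySem.Dict.empty.insert Elsie 0) with hdep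
  have hget : ∀ x, dep.get? x = Option.map (fun j : Nat => (j : Int)) (PySem.List.index? (Elsie :: ea) x) :=
    dep_get? Elsie ea hndE
  show commonAncestor Bessie Elsie t = commonAncestor_alt Bessie Elsie t
  show (if ¬ (Elsie ∈ ba) then scanA ea ba 0
        else ((((PySem.List.index? ba Elsie).getD 0 : Nat) : Int) + 1,
              (((PySem.List.index? ba Elsie).getD 0 : Nat) : Int) + 1))
      = walkB t (depthChainB t (t.length + 1) Elsie 0 (PySem.Dict.empty.insert Elsie 0)) (t.length + 1) Bessie 0
  rw [hdepd, walkB_eq_scanD t dep _ Bessie 0, ← hba]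
  by_cases hmem : Elsie ∈ ba
  · rw [if_neg (by simpa using hmem)]
    obtain ⟨k, hk⟩ := Option.isSome_iff_exists.mp ((PySem.List.index?_isSome_iff ba Elsie).mpr hmem)
    obtain ⟨pre, suf, hsplit, hlen, hpre⟩ := (PySem.List.index?_eq_some_iff ba Elsie k).mp hk
    -- the chain past the first occurrence of Elsie IS Elsie's own chain
    have hsuf : PvChain t Elsie suf := pvChain_suffix (hsplit ▸ hcB)
    have hsufe : suf = ea := pvChain_unique hsuf hcE
    -- prefix nodes are absent from the depth table
    have hskip : ∀ a ∈ pre, dep.contains a = false := by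
      intro a ha
      rw [PySem.Dict.contains_eq_isSome_get?, hget a]
      have hane : a ≠ Elsie := fun h => hpre (h ▸ ha)
      have hanotin : a ∉ ea := by
        intro hin
        rw [← hsufe] at hin
        have hnd' : ba.Nodup := List.Nodup.of_cons hndB
        rw [hsplit] at hnd'
        exact (List.disjoint_of_nodup_append hnd') ha (List.mem_cons.mpr (Or.inr hin))
      rw [PySem.List.index?_cons_of_ne _ (fun h => hane h.symm)]
      rw [(PySem.List.index?_eq_none_iff _ _).mpr hanotin]
      rfl
    rw [hk, hsplit, scanD_skip dep pre (Elsie :: suf) 0 hskip, scanD,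
      if_pos (by rw [PySem.Dict.contains_eq_isSome_get?, hget Elsie, PySem.List.index?_cons_self]; rfl)]
    have hgd0 : dep.getD Elsie 0 = 0 := by
      rw [PySem.Dict.getD_eq_get?_getD, hget Elsie, PySem.List.index?_cons_self]; rfl
    rw [hgd0, ← hlen]
    simp only [Option.getD_some, Prod.mk.injEq]
    refine ⟨by ring, by ring⟩
  · rw [if_pos (by simpa using hmem)]
    have := scanA_eq_scanD Elsie ea dep hget ba 0 hmem
    simpa using this
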